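-- pv_equiv track=rewrite | github.com/dairadriana/CodingBat | String-2/count_code.py | count_code
-- ===== SOURCE A (Python) =====
-- def count_code(str):
--     count = 0
--     letters = []
--     for c in str:
--         if c not in letters:
--             ms = "co{}e".format(c)
--             if ms in str: count += str.count(ms)
--             letters.append(c)
--     return count
-- ===== SOURCE B (Python) =====
-- def count_code(str):
--     return sum(1 for a, b, d in zip(str, str[1:], str[3:])
--                if a == 'c' and b == 'o' and d == 'e')
-- ===== Notes on version B (the rewrite author's own statement) =====
-- stated objective: idiomatic
-- what changed: A collects the distinct letters seen so far and, for each fresh letter, rescans the whole string with a substring test and a count of the four-character pattern built from that letter; B makes one pass zipping the string with its suffixes shifted by 1 and by 3 and counts index positions matching the pattern.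
import Mathlib
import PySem

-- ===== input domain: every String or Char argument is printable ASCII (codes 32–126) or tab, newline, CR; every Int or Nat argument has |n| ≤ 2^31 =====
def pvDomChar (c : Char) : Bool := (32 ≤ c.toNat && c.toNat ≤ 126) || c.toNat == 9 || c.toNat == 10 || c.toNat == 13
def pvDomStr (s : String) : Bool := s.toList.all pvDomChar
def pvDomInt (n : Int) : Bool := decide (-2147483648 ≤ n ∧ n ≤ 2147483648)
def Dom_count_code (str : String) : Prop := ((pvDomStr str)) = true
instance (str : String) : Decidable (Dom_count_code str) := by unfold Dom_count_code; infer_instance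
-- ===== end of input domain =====

-- B replaces A's distinct-letter set plus one full str.count scan per distinct letter by a
-- single zip pass over (str, str[1:], str[3:]); objective: idiomatic (not measured faster).

-- ===== PORT A =====
def count_code (str : String) : Int :=
  (str.toList.foldl (fun (st : Int × List Char) c =>
    if st.2.contains c then st
    else
      let ms : String := "co" ++ String.singleton c ++ "e"
      ((if PySem.Str.isIn ms str then st.1 + (PySem.Str.count str ms : Int) else st.1),
       st.2 ++ [c])) (0, ([] : List Char))).1

-- ===== PORT B =====
def count_code_alt (str : String) : Int :=
  (((str.toList.zip (PySem.Str.slice str (some 1) none).toList).zip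
      (PySem.Str.slice str (some 3) none).toList).countP
    (fun x => x.1.1 == 'c' && x.1.2 == 'o' && x.2 == 'e') : Nat)

-- ===== PRECONDITION & SPEC =====
def Spec_count_code (str : String) (out : Int) : Prop := out = count_code_alt str
instance (str : String) (out : Int) : Decidable (Spec_count_code str out) := by unfold Spec_count_code; infer_instance

-- ===== CLAIM (what is proved, stated in full; the proofs are below) =====
def Claim_equal_count_code : Prop := ∀ (str : String), Dom_count_code str → Spec_count_code str (count_code str)

-- ===== LEMMAS AND PROOFS =====

-- the pattern "co{c}e" as a char list
def pvPat (c : Char) : List Char := ['c', 'o', c, 'e']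

-- occurrences of pvPat c among the suffixes of l (they can never overlap)
def pvOccc (c : Char) : List Char → Nat
  | [] => 0
  | h :: t => (if (pvPat c).isPrefixOf (h :: t) then 1 else 0) + pvOccc c t

-- match "co?e" at the head of a suffix
def pvMtch (l : List Char) : Bool := (l[0]? == some 'c') && (l[1]? == some 'o') && (l[3]? == some 'e')

def pvOccT : List Char → Nat
  | [] => 0
  | h :: t => (if pvMtch (h :: t) then 1 else 0) + pvOccT t

-- the fresh distinct letters A's loop appends, given already-seen letters L
def pvNew (L : List Char) : List Char → List Char
  | [] => []
  | c :: t => if L.contains c then pvNew L t else c :: pvNew (L ++ [c]) t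

theorem pvOccc_skip (c : Char) (r : List Char) :
    pvOccc c ('c' :: 'o' :: c :: 'e' :: r) = 1 + pvOccc c r := by
  simp [pvOccc, pvPat, List.isPrefixOf]

theorem pv_go_eq (c : Char) : ∀ fuel l acc, l.length ≤ fuel →
    PySem.Chars.count.go (pvPat c) fuel l acc = acc + pvOccc c l := by
  intro fuel
  induction fuel with
  | zero =>
    intro l acc h
    have hl : l = [] := by cases l with
      | nil => rfl
      | cons a t => simp at h
    subst hl
    simp [PySem.Chars.count.go, pvOccc]
  | succ n ih =>
    intro l acc h
    match l with
    | [] => simp [PySem.Chars.count.go, pvOccc]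
    | h1 :: t =>
      by_cases hp : (pvPat c).isPrefixOf (h1 :: t) = true
      · obtain ⟨r, hr⟩ := List.isPrefixOf_iff_prefix.mp hp
        have hl : h1 :: t = 'c' :: 'o' :: c :: 'e' :: r := by
          simpa [pvPat] using hr.symm
        injection hl with e1 e2
        subst e1; subst e2
        rw [PySem.Chars.count.go]
        simp only [hp, if_true]
        have hr3 : r.length ≤ n := by simp at h; omega
        rw [show (pvPat c).length = 4 from rfl]
        simpa [pvOccc_skip, Nat.add_comm, Nat.add_assoc, Nat.add_left_comm] using
          ih r (acc + 1) hr3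
      · rw [PySem.Chars.count.go]
        simp only [hp]
        have ht : t.length ≤ n := by simp at h; omega
        rw [ih t acc ht]
        simp [pvOccc, hp]

theorem pv_count_eq (c : Char) (l : List Char) :
    PySem.Chars.count l (pvPat c) = pvOccc c l := by
  rw [PySem.Chars.count]
  have : (pvPat c).isEmpty = false := by simp [pvPat]
  rw [this]
  simpa using pv_go_eq c l.length l 0 le_rfl

theorem pvOccc_zero_of_not_infix (c : Char) (l : List Char)
    (h : ¬ pvPat c <:+: l) : pvOccc c l = 0 := by
  induction l with
  | nil => rfl
  | cons h1 t ih =>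
    have hnp : ¬ (pvPat c).isPrefixOf (h1 :: t) = true := by
      intro hp
      exact h ((List.isPrefixOf_iff_prefix.mp hp).isInfix)
    have hnt : ¬ pvPat c <:+: t := fun hi => h (hi.trans (List.suffix_cons h1 t).isInfix)
    simp [pvOccc, hnp, ih hnt]

-- the single A-loop step adds exactly pvOccc on a fresh letter
theorem pv_term_eq (str : String) (c : Char) (acc : Int) :
    (if PySem.Str.isIn ("co" ++ String.singleton c ++ "e") str
     then acc + (PySem.Str.count str ("co" ++ String.singleton c ++ "e") : Int) else acc)
      = acc + (pvOccc c str.toList : Int) := by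
  have hms : ("co" ++ String.singleton c ++ "e").toList = pvPat c := by
    simp [pvPat, String.singleton]
  rw [show PySem.Str.isIn ("co" ++ String.singleton c ++ "e") str
        = PySem.Chars.isIn (pvPat c) str.toList from by simp [pvPat]]
  rw [show PySem.Str.count str ("co" ++ String.singleton c ++ "e")
        = PySem.Chars.count str.toList (pvPat c) from by simp [pvPat]]
  by_cases hin : PySem.Chars.isIn (pvPat c) str.toList = true
  · simp [hin, pv_count_eq]
  · have h0 : pvOccc c str.toList = 0 :=
      pvOccc_zero_of_not_infix c _
        ((PySem.Chars.isIn_eq_false_iff _ _).mp (eq_false_of_ne_true hin))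
    simp [hin, h0]

-- A's loop step, named for the proofs (definitionally the lambda in count_code)
def pvStep (str : String) (st : Int × List Char) (c : Char) : Int × List Char :=
  if st.2.contains c then st
  else
    ((if PySem.Str.isIn ("co" ++ String.singleton c ++ "e") str
      then st.1 + (PySem.Str.count str ("co" ++ String.singleton c ++ "e") : Int) else st.1),
     st.2 ++ [c])

theorem pv_count_code_eq (str : String) :
    count_code str = (str.toList.foldl (pvStep str) (0, ([] : List Char))).1 := rfl

theorem pv_fold_inv (str : String) : ∀ (t : List Char) (acc : Int) (L : List Char),
    (t.foldl (pvStep str) (acc, L)).1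
      = acc + ((pvNew L t).map (fun c => (pvOccc c str.toList : Int))).sum := by
  intro t
  induction t with
  | nil => intro acc L; simp [pvNew]
  | cons c t ih =>
    intro acc L
    rw [List.foldl_cons]
    by_cases hc : c ∈ L
    · rw [show pvStep str (acc, L) c = (acc, L) from by simp [pvStep, hc]]
      rw [ih acc L]
      simp [pvNew, hc]
    · rw [show pvStep str (acc, L) c
          = ((if PySem.Str.isIn ("co" ++ String.singleton c ++ "e") str
              then acc + (PySem.Str.count str ("co" ++ String.singleton c ++ "e") : Int)
              else acc), L ++ [c]) from by simp [pvStep, hc]]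
      rw [ih _ (L ++ [c]), pv_term_eq]
      rw [show pvNew L (c :: t) = c :: pvNew (L ++ [c]) t from by simp [pvNew, hc]]
      simp only [List.map_cons, List.sum_cons]
      ring

theorem pvNew_skip (L : List Char) (a : Char) (t : List Char) (ha : a ∈ L) :
    pvNew L (a :: t) = pvNew L t := by simp [pvNew, ha]

theorem pvNew_cons (L : List Char) (a : Char) (t : List Char) (ha : a ∉ L) :
    pvNew L (a :: t) = a :: pvNew (L ++ [a]) t := by simp [pvNew, ha]

theorem pvNew_mem : ∀ (t L : List Char) (c : Char), c ∈ t → c ∈ L ∨ c ∈ pvNew L t := by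
  intro t
  induction t with
  | nil => intro L c h; cases h
  | cons a t ih =>
    intro L c h
    by_cases ha : a ∈ L
    · rw [pvNew_skip L a t ha]
      rcases List.mem_cons.mp h with rfl | h
      · exact Or.inl ha
      · exact ih L c h
    · rw [pvNew_cons L a t ha]
      rcases List.mem_cons.mp h with rfl | h
      · exact Or.inr (List.mem_cons_self)
      · rcases ih (L ++ [a]) c h with h' | h'
        · rcases List.mem_append.mp h' with h'' | h''
          · exact Or.inl h''
          · exact Or.inr (by simpa using Or.inl (List.mem_singleton.mp h''))
        · exact Or.inr (List.mem_cons_of_mem a h')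

theorem pvNew_not_mem : ∀ (t L : List Char) (c : Char), c ∈ pvNew L t → c ∉ L := by
  intro t
  induction t with
  | nil => intro L c h; cases h
  | cons a t ih =>
    intro L c h
    by_cases ha : a ∈ L
    · rw [pvNew_skip L a t ha] at h
      exact ih L c h
    · rw [pvNew_cons L a t ha] at h
      rcases List.mem_cons.mp h with rfl | h
      · exact ha
      · intro hL
        exact ih (L ++ [a]) c h (List.mem_append_left _ hL)

theorem pvNew_nodup : ∀ (t L : List Char), (pvNew L t).Nodup := by
  intro t
  induction t with
  | nil => intro L; simp [pvNew]
  | cons a t ih =>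
    intro L
    by_cases ha : a ∈ L
    · rw [pvNew_skip L a t ha]; exact ih L
    · rw [pvNew_cons L a t ha]
      refine List.nodup_cons.mpr ⟨?_, ih (L ++ [a])⟩
      intro hmem
      exact pvNew_not_mem t (L ++ [a]) a hmem (List.mem_append_right _ (by simp))

theorem pv_sum_indicator (D : List Char) (m : Char) :
    (D.map (fun c => if c = m then 1 else 0)).sum = D.count m := by
  induction D with
  | nil => simp
  | cons a D ih =>
    by_cases h : a = m <;> simp [h, ih, Nat.add_comm]

theorem pv_sum_occ (D : List Char) (hD : D.Nodup) :
    ∀ u : List Char, (∀ ch ∈ u, ch ∈ D) →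
    (D.map (fun c => pvOccc c u)).sum = pvOccT u := by
  intro u
  induction u with
  | nil => intro _; simp [pvOccc, pvOccT]
  | cons a t ih =>
    intro hmem
    have hsplit : (D.map (fun c => pvOccc c (a :: t))).sum
        = (D.map (fun c => if (pvPat c).isPrefixOf (a :: t) then 1 else 0)).sum
          + (D.map (fun c => pvOccc c t)).sum := by
      rw [← List.sum_map_add]
      simp [pvOccc]
    rw [hsplit, ih (fun ch hch => hmem ch (List.mem_cons_of_mem a hch))]
    have hhead : (D.map (fun c => if (pvPat c).isPrefixOf (a :: t) then 1 else 0)).sum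
        = (if pvMtch (a :: t) then 1 else 0) := by
      match t with
      | [] => simp [pvPat, List.isPrefixOf, pvMtch]
      | [b] => simp [pvPat, List.isPrefixOf, pvMtch]
      | [b, c3] => simp [pvPat, List.isPrefixOf, pvMtch]
      | b :: c3 :: d :: r =>
        by_cases hm : a = 'c' ∧ b = 'o' ∧ d = 'e'
        · obtain ⟨rfl, rfl, rfl⟩ := hm
          have : ∀ c : Char, ((pvPat c).isPrefixOf ('c' :: 'o' :: c3 :: 'e' :: r))
              = (c == c3) := by
            intro c; simp [pvPat, List.isPrefixOf]
          simp only [this]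
          have hc3 : c3 ∈ D := hmem c3 (by simp)
          rw [show (fun c => if (c == c3) = true then 1 else 0)
                = (fun c => if c = c3 then 1 else 0) by funext c; simp]
          rw [pv_sum_indicator, List.count_eq_one_of_mem hD hc3]
          simp [pvMtch]
        · have hall : ∀ c : Char, ((pvPat c).isPrefixOf (a :: b :: c3 :: d :: r)) = false := by
            intro c
            by_contra hcon
            rw [Bool.not_eq_false] at hcon
            obtain ⟨r2, hr2⟩ := List.isPrefixOf_iff_prefix.mp hcon
            simp only [pvPat, List.cons_append, List.cons.injEq] at hr2
            exact hm ⟨hr2.1.symm, hr2.2.1.symm, hr2.2.2.2.1.symm⟩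
          have hmf : pvMtch (a :: b :: c3 :: d :: r) = false := by
            by_contra hcon
            rw [Bool.not_eq_false] at hcon
            simp [pvMtch] at hcon
            exact hm (by tauto)
          simp [hall, hmf]
    rw [hhead]
    simp [pvOccT, Nat.add_comm]

theorem pv_zip_eq : ∀ l : List Char,
    (((l.zip (l.drop 1)).zip (l.drop 3)).countP
      (fun x => x.1.1 == 'c' && x.1.2 == 'o' && x.2 == 'e')) = pvOccT l := by
  intro l
  induction l with
  | nil => simp [pvOccT]
  | cons a t ih =>
    match t, ih with
    | [], _ => simp [pvOccT, pvMtch]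
    | [b], _ => simp [pvOccT, pvMtch, List.zip]
    | [b, c3], _ => simp [pvOccT, pvMtch, List.zip]
    | b :: c3 :: d :: r, ih =>
      have hz : ((a :: b :: c3 :: d :: r).zip ((a :: b :: c3 :: d :: r).drop 1)).zip
            ((a :: b :: c3 :: d :: r).drop 3)
          = ((a, b), d) :: (((b :: c3 :: d :: r).zip ((b :: c3 :: d :: r).drop 1)).zip
            ((b :: c3 :: d :: r).drop 3)) := by
        simp [List.zip]
      rw [hz, List.countP_cons]
      rw [ih]
      have : pvMtch (a :: b :: c3 :: d :: r) = (a == 'c' && b == 'o' && d == 'e') := by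
        simp [pvMtch]
      simp [pvOccT, this, Nat.add_comm]

-- ===== VERDICT (by name: the statement is the Claim_ definition above) =====
theorem count_code_spec : Claim_equal_count_code := by
  intro str _
  unfold Spec_count_code count_code_alt
  rw [pv_count_code_eq, pv_fold_inv str str.toList 0 []]
  have hslice1 : (PySem.Str.slice str (some 1) none).toList = str.toList.drop 1 := by
    simp [PySem.Str.toList_slice, PySem.List.slice_from]
  have hslice3 : (PySem.Str.slice str (some 3) none).toList = str.toList.drop 3 := by
    simp [PySem.Str.toList_slice, PySem.List.slice_from]
  rw [hslice1, hslice3, pv_zip_eq]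
  have hmem : ∀ ch ∈ str.toList, ch ∈ pvNew [] str.toList := by
    intro ch hch
    rcases pvNew_mem str.toList [] ch hch with h | h
    · cases h
    · exact h
  rw [← pv_sum_occ (pvNew [] str.toList) (pvNew_nodup str.toList []) str.toList hmem]
  rw [show ((pvNew [] str.toList).map (fun c => (pvOccc c str.toList : Int))).sum
        = (((pvNew [] str.toList).map (fun c => pvOccc c str.toList)).sum : Int) by
    induction pvNew [] str.toList with
    | nil => simp
    | cons a D ih => simp [ih]]
  simp
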